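-- pv_equiv track=rewrite | github.com/GolzitskyNikolay/SPEAC-analysis | speac_library/speac/speac_analysis.py | collect_beats
-- ===== SOURCE A (Python) =====
-- def collect_beats(clarified_music, beat):
--     collected_beat = collect_beat(beat, clarified_music)
--     accumulated_beat = beat
--     result = [collected_beat]
--
--     while True:
--         accumulated_beat += beat
--         collected_beat = collect_beat(accumulated_beat, clarified_music)
--
--         if collected_beat:
--             result.append(collected_beat)
--
--         if len(clarified_music) == 0:
--             return result
--
-- def collect_beat(beat, clarified_music):
--     result = []
--     size = len(clarified_music)
--     for i in range(1, size + 1):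
--         event = clarified_music[0]
--         if event[0] < beat:
--             result.append(event)
--             clarified_music.pop(0)
--     return result
-- ===== SOURCE B (Python) =====
-- def collect_beats(clarified_music, beat):
--     # Single left-to-right pass with an index pointer; jumps the threshold
--     # multiplier directly to the next productive group instead of repeatedly
--     # pop(0)-rescanning.  Return value only: unlike A, it does NOT empty
--     # clarified_music in place.
--     events = clarified_music
--     n = len(events)
--     i = 0
--     while i < n and events[i][0] < beat:
--         i += 1
--     result = [events[:i]]
--     k = 1
--     while i < n:
--         k = max(k + 1, events[i][0] // beat + 1)
--         threshold = k * beat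
--         j = i
--         while j < n and events[j][0] < threshold:
--             j += 1
--         result.append(events[i:j])
--         i = j
--     return result
-- ===== Notes on version B (the rewrite author's own statement) =====
-- stated objective: alternative
-- what changed: B replaces A's repeated pop(0)-and-rescan passes (one scan of the remaining list per threshold step) with a single left-to-right index-pointer pass that computes the next productive threshold multiple directly via floor division; equivalence is about the return value only (A empties its argument in place, B does not mutate it).
import Mathlib
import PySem

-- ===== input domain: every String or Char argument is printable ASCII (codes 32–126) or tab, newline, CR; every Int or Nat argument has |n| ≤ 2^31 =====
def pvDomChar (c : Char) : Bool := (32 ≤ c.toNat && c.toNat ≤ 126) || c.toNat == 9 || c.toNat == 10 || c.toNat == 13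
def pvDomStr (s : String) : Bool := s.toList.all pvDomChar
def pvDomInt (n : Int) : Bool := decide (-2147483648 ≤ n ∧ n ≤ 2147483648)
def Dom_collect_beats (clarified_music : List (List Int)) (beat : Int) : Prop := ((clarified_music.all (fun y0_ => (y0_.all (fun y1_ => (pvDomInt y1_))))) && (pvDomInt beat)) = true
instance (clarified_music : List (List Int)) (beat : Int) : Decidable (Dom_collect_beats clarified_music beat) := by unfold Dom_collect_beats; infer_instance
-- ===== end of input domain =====

-- B replaces A's repeated pop(0)+rescan passes with one index-pointer pass that jumps the
-- threshold multiplier straight to the next productive group (alternative algorithm, same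
-- measured cost). Return value only: Python A empties its list argument in place, B does not.

-- ===== PORT A =====

-- event[0]; Python raises IndexError on an empty event — excluded by Pre_ (the default 0 is never relied on inside Pre_)
def pvHead (e : List Int) : Int := e.headD 0

-- the for-loop of collect_beat: runs `size` times over (result, music); pop(0) drops the head
def collectBeatGo (b : Int) : Nat → List (List Int) → List (List Int) → List (List Int) × List (List Int)
  | 0, res, music => (res, music)
  | n+1, res, music =>
    match music with
    | [] => collectBeatGo b n res []   -- Python would raise IndexError here; unreachable (iterations = initial size ≥ pops)
    | e :: rest =>
      if pvHead e < b then collectBeatGo b n (res ++ [e]) rest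
      else collectBeatGo b n res (e :: rest)

def collectBeat (b : Int) (music : List (List Int)) : List (List Int) × List (List Int) :=
  collectBeatGo b music.length [] music

-- fuel bound for the `while True` loop (Python A loops forever when beat ≤ 0 and events remain; Pre_ excludes that)
def pvMaxHead (music : List (List Int)) : Int := (music.map pvHead).foldr max 0

def pvFuel (music : List (List Int)) (acc : Int) : Nat := (pvMaxHead music + 1 - acc).toNat + 1

def collectBeatsLoop (beat : Int) : Nat → Int → List (List Int) → List (List (List Int)) → List (List (List Int))
  | 0, _, _, res => res   -- fuel exhaustion: unreachable under Pre_
  | n+1, acc, music, res =>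
    let acc' := acc + beat
    let p := collectBeat acc' music
    let res' := if p.1 ≠ [] then res ++ [p.1] else res
    if p.2.length = 0 then res'
    else collectBeatsLoop beat n acc' p.2 res'

def collect_beats (clarified_music : List (List Int)) (beat : Int) : List (List (List Int)) :=
  let p := collectBeat beat clarified_music
  collectBeatsLoop beat (pvFuel p.2 beat) beat p.2 [p.1]

-- ===== PORT B =====

-- inner `while j < n and events[j][0] < threshold` run, as recursion on the suffix from the pointer
def altRun (thr : Int) : List (List Int) → List (List Int) × List (List Int)
  | [] => ([], [])
  | e :: rest =>
    if pvHead e < thr then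
      let p := altRun thr rest
      (e :: p.1, p.2)
    else ([], e :: rest)

-- termination helper for altLoop: the run leaves a suffix no longer than its input
lemma altRun_snd_length_le (thr : Int) (l : List (List Int)) :
    (altRun thr l).2.length ≤ l.length := by
  induction l with
  | nil => simp [altRun]
  | cons e rest ih =>
    by_cases he : pvHead e < thr
    · simp only [altRun, he, if_true]
      exact le_trans ih (by simp)
    · simp [altRun, he]

-- outer `while i < n` loop of B; the first run test always holds (pvHead e < k' * beat when 1 ≤ beat),
-- so e is consumed directly — Python B raises ZeroDivisionError (beat = 0) or diverges only outside Pre_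
def altLoop (beat : Int) (k : Int) : List (List Int) → List (List (List Int))
  | [] => []
  | e :: rest =>
    let k' := max (k + 1) (PySem.Int.floordiv (pvHead e) beat + 1)
    let p := altRun (k' * beat) rest
    (e :: p.1) :: altLoop beat k' p.2
  termination_by l => l.length
  decreasing_by
    simpa using Nat.lt_succ_of_le (altRun_snd_length_le _ rest)

def collect_beats_alt (clarified_music : List (List Int)) (beat : Int) : List (List (List Int)) :=
  let p := altRun beat clarified_music
  p.1 :: altLoop beat 1 p.2

-- ===== PRECONDITION & SPEC =====
-- Pre_ = exactly where Python A returns: empty events make event[0] raise IndexError, and with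
-- beat ≤ 0 the thresholds never grow, so A loops forever unless the very first pass consumes everything.
def Pre_collect_beats (clarified_music : List (List Int)) (beat : Int) : Prop :=
  (∀ e ∈ clarified_music, e ≠ []) ∧ (1 ≤ beat ∨ ∀ e ∈ clarified_music, e.headD 0 < beat)
instance (clarified_music : List (List Int)) (beat : Int) : Decidable (Pre_collect_beats clarified_music beat) := by unfold Pre_collect_beats; infer_instance

def pvWitness_collect_beats : List (List Int) × Int := ([[0], [7], [3]], 2)

def Spec_collect_beats (clarified_music : List (List Int)) (beat : Int) (out : List (List (List Int))) : Prop := out = collect_beats_alt clarified_music beat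
instance (clarified_music : List (List Int)) (beat : Int) (out : List (List (List Int))) : Decidable (Spec_collect_beats clarified_music beat out) := by unfold Spec_collect_beats; infer_instance

-- ===== CLAIM (what is proved, stated in full; the proofs are below) =====
def Claim_equal_collect_beats : Prop := ∀ (clarified_music : List (List Int)) (beat : Int), Dom_collect_beats clarified_music beat → Pre_collect_beats clarified_music beat → Spec_collect_beats clarified_music beat (collect_beats clarified_music beat)

-- ===== LEMMAS AND PROOFS =====

-- A's pass stalls once the front event fails the threshold test
lemma collectBeatGo_stall (b : Int) (n : Nat) (res : List (List Int)) (e : List Int)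
    (rest : List (List Int)) (he : ¬ pvHead e < b) :
    collectBeatGo b n res (e :: rest) = (res, e :: rest) := by
  induction n with
  | zero => rfl
  | succ n ih => simp [collectBeatGo, he, ih]

-- A's pass = takeWhile / dropWhile on the head test
lemma collectBeatGo_eq (b : Int) (music : List (List Int)) :
    ∀ res, collectBeatGo b music.length res music =
      (res ++ music.takeWhile (fun e => pvHead e < b), music.dropWhile (fun e => pvHead e < b)) := by
  induction music with
  | nil => intro res; simp [collectBeatGo]
  | cons e rest ih =>
    intro res
    by_cases he : pvHead e < b
    · simp [collectBeatGo, List.length_cons, he, ih (res ++ [e])]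
    · simp [List.length_cons, collectBeatGo, he, collectBeatGo_stall b rest.length res e rest he]

lemma collectBeat_eq (b : Int) (music : List (List Int)) :
    collectBeat b music =
      (music.takeWhile (fun e => pvHead e < b), music.dropWhile (fun e => pvHead e < b)) := by
  simpa [collectBeat] using collectBeatGo_eq b music []

-- B's run = takeWhile / dropWhile on the head test
lemma altRun_eq (thr : Int) (music : List (List Int)) :
    altRun thr music =
      (music.takeWhile (fun e => pvHead e < thr), music.dropWhile (fun e => pvHead e < thr)) := by
  induction music with
  | nil => rfl
  | cons e rest ih =>
    by_cases he : pvHead e < thr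
    · simp [altRun, he, ih]
    · simp [altRun, he]

lemma head_le_maxHead (music : List (List Int)) (e : List Int) (he : e ∈ music) :
    pvHead e ≤ pvMaxHead music := by
  induction music with
  | nil => cases he
  | cons x xs ih =>
    rcases List.mem_cons.1 he with h | h
    · subst h
      simp only [pvMaxHead, List.map, List.foldr]
      exact le_max_left _ _
    · have := ih h
      simp only [pvMaxHead, List.map, List.foldr] at this ⊢
      exact le_trans this (le_max_right _ _)

lemma maxHead_dropWhile_le (p : List Int → Bool) (music : List (List Int)) :
    pvMaxHead (music.dropWhile p) ≤ pvMaxHead music := by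
  induction music with
  | nil => simp [List.dropWhile]
  | cons x xs ih =>
    by_cases h : p x
    · simp only [List.dropWhile_cons, h, if_true]
      refine le_trans ih ?_
      simp only [pvMaxHead, List.map, List.foldr]
      exact le_max_right _ _
    · simp [h]

-- first element of a dropWhile fails the predicate
lemma dropWhile_head_fails {α : Type} (p : α → Bool) (l : List α) (e : α) (rest : List α)
    (h : l.dropWhile p = e :: rest) : ¬ p e = true := by
  induction l with
  | nil => simp [List.dropWhile] at h
  | cons x xs ih =>
    by_cases hx : p x
    · exact ih (by simpa [List.dropWhile_cons, hx] using h)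
    · simp only [List.dropWhile_cons, hx] at h
      simp at h
      rw [← h.1]
      exact hx

-- floor division bracket: (h // b) * b ≤ h < (h // b + 1) * b for 1 ≤ b
lemma floordiv_bracket (h b : Int) (hb : 1 ≤ b) :
    (PySem.Int.floordiv h b) * b ≤ h ∧ h < (PySem.Int.floordiv h b + 1) * b := by
  have h1 : PySem.Int.floordiv h b = h / b := PySem.Int.floordiv_eq_ediv_of_pos (by omega)
  constructor
  · rw [h1]; exact Int.ediv_mul_le h (by omega)
  · rw [h1]
    exact Int.lt_ediv_add_one_mul_self h (by omega)

-- the main loop correspondence: A's fuelled threshold loop equals B's jumping loop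
lemma loop_eq (beat : Int) (hb : 1 ≤ beat) :
    ∀ (n : Nat) (music : List (List Int)) (k : Int), 1 ≤ k →
      (∀ e rest, music = e :: rest → k * beat ≤ pvHead e) →
      pvFuel music (k * beat) ≤ n →
      ∀ res, collectBeatsLoop beat n (k * beat) music res = res ++ altLoop beat k music := by
  intro n
  induction n with
  | zero =>
    intro music k _ _ hf
    simp [pvFuel] at hf
  | succ n ih =>
    intro music k hk hinv hf res
    match music with
    | [] =>
      simp [collectBeatsLoop, collectBeat, collectBeatGo, altLoop]
    | e :: rest =>
      have hhead : k * beat ≤ pvHead e := hinv e rest rfl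
      have hM : pvHead e ≤ pvMaxHead (e :: rest) := head_le_maxHead _ e (by simp)
      have hbr := floordiv_bracket (pvHead e) beat hb
      have hacc : k * beat + beat = (k + 1) * beat := by ring
      rw [collectBeatsLoop]
      simp only [collectBeat_eq, hacc]
      by_cases hcase : PySem.Int.floordiv (pvHead e) beat + 1 ≤ k + 1
      · -- productive pass at threshold (k+1)*beat
        have hlt : pvHead e < (k + 1) * beat := by
          have : (PySem.Int.floordiv (pvHead e) beat + 1) * beat ≤ (k + 1) * beat :=
            mul_le_mul_of_nonneg_right hcase (by omega)
          omega
        have hmax : max (k + 1) (PySem.Int.floordiv (pvHead e) beat + 1) = k + 1 := by omega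
        have htW : (e :: rest).takeWhile (fun x => pvHead x < (k + 1) * beat) =
            e :: rest.takeWhile (fun x => pvHead x < (k + 1) * beat) := by
          simp [hlt]
        have hdW : (e :: rest).dropWhile (fun x => pvHead x < (k + 1) * beat) =
            rest.dropWhile (fun x => pvHead x < (k + 1) * beat) := by
          simp [hlt]
        have halt : altLoop beat k (e :: rest) =
            (e :: rest.takeWhile (fun x => pvHead x < (k + 1) * beat)) ::
              altLoop beat (k + 1) (rest.dropWhile (fun x => pvHead x < (k + 1) * beat)) := by
          rw [altLoop, hmax, altRun_eq]
        rw [halt, htW, hdW]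
        simp only [ne_eq, reduceCtorEq, not_false_eq_true, if_true]
        cases hd : rest.dropWhile (fun x => pvHead x < (k + 1) * beat) with
        | nil => simp [altLoop]
        | cons e' rest' =>
          simp only [List.length_cons, Nat.add_one_ne_zero, if_false]
          have hinv' : ∀ x xs, e' :: rest' = x :: xs → (k + 1) * beat ≤ pvHead x := by
            intro x xs hx
            injection hx with h1 _; subst h1
            have := dropWhile_head_fails (fun y => decide (pvHead y < (k + 1) * beat)) rest e' rest' hd
            simp at this
            exact this
          have hfuel' : pvFuel (e' :: rest') ((k + 1) * beat) ≤ n := by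
            have hM' : pvMaxHead (e' :: rest') ≤ pvMaxHead (e :: rest) := by
              have h1 := maxHead_dropWhile_le (fun x => decide (pvHead x < (k + 1) * beat)) rest
              rw [hd] at h1
              have h2 : pvMaxHead rest ≤ pvMaxHead (e :: rest) := by
                simp only [pvMaxHead, List.map, List.foldr]
                exact le_max_right _ _
              exact le_trans h1 h2
            simp only [pvFuel] at hf ⊢
            have hMk : k * beat ≤ pvMaxHead (e :: rest) := le_trans hhead hM
            have hkk : (k + 1) * beat = k * beat + beat := by ring
            omega
          rw [ih (e' :: rest') (k + 1) (by omega) hinv' hfuel']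
          simp
      · -- empty pass: A burns one fuel step, threshold advances, B's k' is unchanged
        have hge : (k + 1) * beat ≤ pvHead e := by
          have : (k + 1) * beat ≤ (PySem.Int.floordiv (pvHead e) beat) * beat :=
            mul_le_mul_of_nonneg_right (by omega) (by omega)
          omega
        have hnlt : ¬ pvHead e < (k + 1) * beat := by omega
        have htW : (e :: rest).takeWhile (fun x => pvHead x < (k + 1) * beat) = [] := by
          simp [hnlt]
        have hdW : (e :: rest).dropWhile (fun x => pvHead x < (k + 1) * beat) = e :: rest := by
          simp [hnlt]
        have halt : altLoop beat k (e :: rest) = altLoop beat (k + 1) (e :: rest) := by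
          rw [altLoop, altLoop]
          have h1 : max (k + 1) (PySem.Int.floordiv (pvHead e) beat + 1) =
              PySem.Int.floordiv (pvHead e) beat + 1 := by omega
          have h2 : max (k + 1 + 1) (PySem.Int.floordiv (pvHead e) beat + 1) =
              PySem.Int.floordiv (pvHead e) beat + 1 := by omega
          rw [h1, h2]
        rw [halt, htW, hdW]
        simp only [ne_eq, not_true_eq_false, if_false, List.length_cons, Nat.add_one_ne_zero]
        apply ih (e :: rest) (k + 1) (by omega)
        · intro x xs hx; injection hx with h1 _; subst h1; omega
        · simp only [pvFuel] at hf ⊢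
          have hkk : (k + 1) * beat = k * beat + beat := by ring
          have hMge : (k + 1) * beat ≤ pvMaxHead (e :: rest) := le_trans hge hM
          omega

-- the disjunct ∀ heads < beat empties the list in the very first pass
lemma dropWhile_all (music : List (List Int)) (beat : Int)
    (hall : ∀ e ∈ music, e.headD 0 < beat) :
    music.dropWhile (fun e => pvHead e < beat) = [] := by
  induction music with
  | nil => rfl
  | cons x xs ih =>
    have hx : pvHead x < beat := hall x (by simp)
    simp only [List.dropWhile_cons, hx, decide_true, if_true]
    exact ih (fun e he => hall e (by simp [he]))

-- ===== VERDICT (by name: the statement is the Claim_ definition above) =====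
theorem collect_beats_spec : Claim_equal_collect_beats := by
  intro music beat _ hpre
  unfold Spec_collect_beats collect_beats collect_beats_alt
  rw [collectBeat_eq, altRun_eq]
  rcases hpre with ⟨_, hb | hall⟩
  · -- beat ≥ 1: the main loop correspondence with k = 1
    set drop := music.dropWhile (fun e => pvHead e < beat) with hdr
    have h1 : (1 : Int) * beat = beat := one_mul beat
    have := loop_eq beat hb (pvFuel drop beat) drop 1 le_rfl
      (by
        intro e rest he
        have := dropWhile_head_fails (fun y => decide (pvHead y < beat)) music e rest
          (by rw [← hdr, he])
        simp at this
        rw [h1]; exact this)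
      (by rw [h1])
      [music.takeWhile (fun e => pvHead e < beat)]
    rw [h1] at this
    simpa using this
  · -- beat ≤ 0 but everything is consumed in the very first pass
    rw [dropWhile_all music beat hall]
    simp [collectBeatsLoop, pvFuel, collectBeat, collectBeatGo, altLoop]
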